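-- pv_equiv track=rewrite | github.com/amaganzini/adventofcode2024 | day5/day5.py | check_valid_update
-- ===== SOURCE A (Python) =====
-- def check_valid_update(rules, update):
--     """Returns if an update is valid"""
--
--     for early, late in rules.items():
--
--         #if the early part of the rule is in the update
--         if early in update:
--             early_index = update.index(early)
--
--             #make sure every late val is after it
--             for late_val in late:
--
--                 if late_val in update and update.index(late_val) < early_index:
--                     return False
--
--     return True
-- ===== SOURCE B (Python) =====
-- def check_valid_update(rules, update):
--     """Returns if an update is valid"""
--
--     # reverse table: preds[v] = all 'early' keys that must come before v
--     preds = {}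
--     for early, late in rules.items():
--         for late_val in late:
--             preds.setdefault(late_val, []).append(early)
--
--     # one left-to-right pass; 'seen' = values already passed
--     present = set(update)
--     seen = set()
--     for cur in update:
--         if cur not in seen:
--             for e in preds.get(cur, []):
--                 # e must precede cur: bad if e occurs in update only later
--                 if e != cur and e not in seen and e in present:
--                     return False
--             seen.add(cur)
--     return True
-- ===== Notes on version B (the rewrite author's own statement) =====
-- stated objective: faster
-- what changed: Replaced A's per-rule scan with repeated list membership/.index passes by a precomputed reverse predecessor table plus one left-to-right pass over update maintaining seen/present hash sets.
import Mathlib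
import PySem

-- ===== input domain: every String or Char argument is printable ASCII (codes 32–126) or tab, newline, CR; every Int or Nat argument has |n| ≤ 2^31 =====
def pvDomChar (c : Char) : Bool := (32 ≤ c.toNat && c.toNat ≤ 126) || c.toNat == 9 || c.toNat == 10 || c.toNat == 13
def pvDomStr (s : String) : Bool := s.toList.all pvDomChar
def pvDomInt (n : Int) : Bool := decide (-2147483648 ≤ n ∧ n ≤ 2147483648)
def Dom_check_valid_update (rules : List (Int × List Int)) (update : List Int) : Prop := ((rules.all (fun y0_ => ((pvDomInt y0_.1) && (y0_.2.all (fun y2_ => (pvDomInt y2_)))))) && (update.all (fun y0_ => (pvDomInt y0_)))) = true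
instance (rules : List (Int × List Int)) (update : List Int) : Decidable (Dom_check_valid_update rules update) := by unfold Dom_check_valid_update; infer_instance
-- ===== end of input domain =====

-- B replaces A's per-rule repeated list membership/.index scans by a precomputed reverse
-- predecessor table plus one left-to-right pass over update with seen/present sets (faster).


-- ===== PORT A =====
-- inner 'for late_val in late' loop; returns true when it would 'return False'.
-- Python's 'update.index(late_val)' is guarded by 'late_val in update', so index? is some
-- there and '.getD 0' is exact under the guard.
def pvLateLoopA (update : List Int) (early_index : Nat) : List Int → Bool
  | [] => false
  | late_val :: rest =>
    if late_val ∈ update ∧ (PySem.List.index? update late_val).getD 0 < early_index then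
      true
    else pvLateLoopA update early_index rest

def check_valid_update (rules : List (Int × List Int)) (update : List Int) : Bool :=
  match rules with
  | [] => true
  | (early, late) :: rest =>
    if early ∈ update then
      if pvLateLoopA update ((PySem.List.index? update early).getD 0) late then false
      else check_valid_update rest update
    else check_valid_update rest update

-- ===== PORT B =====
-- preds.setdefault(late_val, []).append(early), over all rules
def pvBuildPreds (rules : List (Int × List Int)) : PySem.Dict Int (List Int) :=
  rules.foldl
    (fun d p => p.2.foldl (fun d v => d.insert v (d.getD v [] ++ [p.1])) d)
    PySem.Dict.empty

-- the single pass over update with the seen-set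
def pvScanB (preds : PySem.Dict Int (List Int)) (present : PySem.Set Int) :
    PySem.Set Int → List Int → Bool
  | _, [] => true
  | seen, cur :: rest =>
    if PySem.Set.contains seen cur then pvScanB preds present seen rest
    else if (preds.getD cur []).any
        (fun e => e != cur && !(PySem.Set.contains seen e) && PySem.Set.contains present e) then
      false
    else pvScanB preds present (PySem.Set.add seen cur) rest

def check_valid_update_alt (rules : List (Int × List Int)) (update : List Int) : Bool :=
  pvScanB (pvBuildPreds rules) (PySem.Set.ofList update) PySem.Set.empty update

-- ===== PRECONDITION & SPEC =====
def Spec_check_valid_update (rules : List (Int × List Int)) (update : List Int) (out : Bool) : Prop := out = check_valid_update_alt rules update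
instance (rules : List (Int × List Int)) (update : List Int) (out : Bool) : Decidable (Spec_check_valid_update rules update out) := by unfold Spec_check_valid_update; infer_instance

-- ===== CLAIM (what is proved, stated in full; the proofs are below) =====
def Claim_equal_check_valid_update : Prop := ∀ (rules : List (Int × List Int)) (update : List Int), Dom_check_valid_update rules update → Spec_check_valid_update rules update (check_valid_update rules update)

-- ===== LEMMAS AND PROOFS =====

-- first-occurrence index, defaulting to 0 (always used under a membership guard)
def pvFi (update : List Int) (v : Int) : Nat := (PySem.List.index? update v).getD 0

-- the violation test both programs decide (negated): some rule (early, late) with a late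
-- value occurring strictly before early's first occurrence
def pvViolB (rules : List (Int × List Int)) (update : List Int) : Bool :=
  rules.any (fun p => decide (p.1 ∈ update)
    && p.2.any (fun v => decide (v ∈ update) && decide (pvFi update v < pvFi update p.1)))

-- ---- A-side characterisation ----
theorem pvLateLoopA_eq (update : List Int) (ei : Nat) (late : List Int) :
    pvLateLoopA update ei late
      = late.any (fun v => decide (v ∈ update) && decide (pvFi update v < ei)) := by
  induction late with
  | nil => rfl
  | cons v rest ih =>
    by_cases h : v ∈ update ∧ (PySem.List.index? update v).getD 0 < ei <;>
      simp [pvLateLoopA, h, ih, pvFi] <;> tauto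

theorem checkA_eq_viol (rules : List (Int × List Int)) (update : List Int) :
    check_valid_update rules update = !pvViolB rules update := by
  induction rules with
  | nil => rfl
  | cons p rest ih =>
    obtain ⟨early, late⟩ := p
    have step : check_valid_update ((early, late) :: rest) update
        = (!(decide (early ∈ update) && pvLateLoopA update (pvFi update early) late)
            && check_valid_update rest update) := by
      by_cases h : early ∈ update
      · by_cases h2 : pvLateLoopA update (pvFi update early) late = true <;>
          simp [check_valid_update, h, h2, pvFi]
      · simp [check_valid_update, h]
    rw [step, ih, pvLateLoopA_eq]
    simp only [pvViolB, List.any_cons, Bool.not_or]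

-- ---- preds table characterisation (membership) ----
theorem pvBuildInner_mem (late : List Int) (e : Int) (d : PySem.Dict Int (List Int))
    (v x : Int) :
    x ∈ ((late.foldl (fun d u => d.insert u (d.getD u [] ++ [e])) d).getD v [])
      ↔ x ∈ d.getD v [] ∨ (x = e ∧ v ∈ late) := by
  induction late generalizing d with
  | nil => simp
  | cons u rest ih =>
    simp only [List.foldl_cons, ih, PySem.Dict.getD_insert, List.mem_cons]
    by_cases h : v = u <;> simp [h] <;> tauto

theorem pvBuildPreds_mem (rules : List (Int × List Int)) (v x : Int) :
    x ∈ ((pvBuildPreds rules).getD v [])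
      ↔ ∃ l, (x, l) ∈ rules ∧ v ∈ l := by
  unfold pvBuildPreds
  suffices h : ∀ d : PySem.Dict Int (List Int),
      x ∈ ((rules.foldl (fun d p => p.2.foldl (fun d u => d.insert u (d.getD u [] ++ [p.1])) d) d).getD v [])
        ↔ x ∈ d.getD v [] ∨ ∃ l, (x, l) ∈ rules ∧ v ∈ l by
    simpa using h PySem.Dict.empty
  induction rules with
  | nil => simp
  | cons p rest ih =>
    obtain ⟨a, b⟩ := p
    intro d
    simp only [List.foldl_cons, ih, pvBuildInner_mem, List.mem_cons]
    constructor
    · rintro ((h | ⟨rfl, hv⟩) | ⟨l, hl, hv⟩)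
      · exact Or.inl h
      · exact Or.inr ⟨b, Or.inl rfl, hv⟩
      · exact Or.inr ⟨l, Or.inr hl, hv⟩
    · rintro (h | ⟨l, (hl | hl), hv⟩)
      · exact Or.inl (Or.inl h)
      · injection hl with h1 h2
        subst h1; subst h2
        exact Or.inl (Or.inr ⟨rfl, hv⟩)
      · exact Or.inr ⟨l, hl, hv⟩

-- ---- index? facts for a split update = pref ++ cur :: rest ----
theorem pvIndex?_append_not_mem (l t : List Int) (v : Int) (h : v ∉ l) :
    PySem.List.index? (l ++ t) v = (PySem.List.index? t v).map (· + l.length) := by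
  induction l with
  | nil =>
    rw [List.nil_append]
    cases hk : PySem.List.index? t v <;> simp
  | cons a l ih =>
    have hne : a ≠ v := fun hav => h (hav ▸ List.mem_cons_self)
    rw [List.cons_append, PySem.List.index?_cons_of_ne (l ++ t) hne,
      ih (fun hv => h (List.mem_cons_of_mem a hv))]
    cases hk : PySem.List.index? t v <;> simp <;> omega

theorem pvFi_of_mem_pref (pref tail : List Int) (e : Int) (he : e ∈ pref) :
    pvFi (pref ++ tail) e < pref.length := by
  unfold pvFi
  rw [PySem.List.index?_append_of_mem tail he]
  rcases Option.isSome_iff_exists.mp ((PySem.List.index?_isSome_iff pref e).mpr he)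
    with ⟨k, hk⟩
  obtain ⟨hlt, -, -⟩ := PySem.List.getElem_of_index?_eq_some hk
  rw [hk]
  simpa using hlt

theorem pvFi_split_self (pref rest : List Int) (cur : Int) (hc : cur ∉ pref) :
    pvFi (pref ++ cur :: rest) cur = pref.length := by
  unfold pvFi
  rw [pvIndex?_append_not_mem _ _ _ hc, PySem.List.index?_cons_self]
  simp

theorem pvFi_split_later (pref rest : List Int) (cur e : Int)
    (hne : e ≠ cur) (hp : e ∉ pref) (hu : e ∈ pref ++ cur :: rest) :
    pref.length < pvFi (pref ++ cur :: rest) e := by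
  have hr : e ∈ rest := by
    rcases List.mem_append.mp hu with h | h
    · exact absurd h hp
    · rcases List.mem_cons.mp h with h | h
      · exact absurd h hne
      · exact h
  unfold pvFi
  rw [pvIndex?_append_not_mem _ _ _ hp,
    PySem.List.index?_cons_of_ne rest (fun hce => hne hce.symm)]
  rcases Option.isSome_iff_exists.mp ((PySem.List.index?_isSome_iff rest e).mpr hr)
    with ⟨k, hk⟩
  rw [hk]
  simp

-- the Bool test of B's inner loop, as an index comparison (at a first occurrence cur)
theorem pvInnerTest_iff (pref rest : List Int) (cur e : Int) (seen : PySem.Set Int)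
    (hseen : ∀ x : Int, PySem.Set.contains seen x = true ↔ x ∈ pref)
    (hc : cur ∉ pref) :
    ((e != cur && !(PySem.Set.contains seen e)
        && PySem.Set.contains (PySem.Set.ofList (pref ++ cur :: rest)) e) = true)
      ↔ (e ∈ pref ++ cur :: rest
          ∧ pvFi (pref ++ cur :: rest) cur < pvFi (pref ++ cur :: rest) e) := by
  simp only [Bool.and_eq_true, bne_iff_ne, Bool.not_eq_true', PySem.Set.contains_iff,
    PySem.Set.mem_ofList]
  constructor
  · rintro ⟨⟨hne, hsn⟩, hu⟩
    have hp : e ∉ pref := fun h => by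
      have := (hseen e).mpr h; rw [hsn] at this; cases this
    refine ⟨hu, ?_⟩
    rw [pvFi_split_self pref rest cur hc]
    exact pvFi_split_later pref rest cur e hne hp hu
  · rintro ⟨hu, hlt⟩
    rw [pvFi_split_self pref rest cur hc] at hlt
    have hp : e ∉ pref := fun h =>
      absurd (pvFi_of_mem_pref pref (cur :: rest) e h) (by omega)
    have hne : e ≠ cur := fun h => by
      rw [h, pvFi_split_self pref rest cur hc] at hlt; omega
    refine ⟨⟨hne, ?_⟩, hu⟩
    rw [Bool.eq_false_iff]
    intro hcon
    exact hp ((hseen e).mp hcon)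

-- ---- B-side scan characterisation ----
theorem pvScanB_false_iff (preds : PySem.Dict Int (List Int)) (U : List Int) :
    ∀ (rest pref : List Int) (seen : PySem.Set Int), U = pref ++ rest →
    (∀ x : Int, PySem.Set.contains seen x = true ↔ x ∈ pref) →
    (pvScanB preds (PySem.Set.ofList U) seen rest = false
      ↔ ∃ v ∈ rest, v ∉ pref ∧ ∃ e ∈ preds.getD v [], e ∈ U ∧ pvFi U v < pvFi U e) := by
  intro rest
  induction rest with
  | nil => intro pref seen _ _; simp [pvScanB]
  | cons cur rest ih =>
    intro pref seen hU hseen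
    by_cases hc : PySem.Set.contains seen cur = true
    · have hcp : cur ∈ pref := (hseen cur).mp hc
      have e1 : pvScanB preds (PySem.Set.ofList U) seen (cur :: rest) = pvScanB preds (PySem.Set.ofList U) seen rest := by
        simp only [pvScanB]; rw [if_pos hc]
      rw [e1, ih (pref ++ [cur]) seen (by rw [hU]; simp) (fun x => by
        rw [hseen x]
        simp only [List.mem_append, List.mem_singleton]
        constructor
        · exact fun h => Or.inl h
        · rintro (h | rfl) <;> [exact h; exact hcp])]
      constructor
      · rintro ⟨v, hv, hvp, rest_⟩
        simp only [List.mem_append, List.mem_singleton, not_or] at hvp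
        exact ⟨v, List.mem_cons_of_mem cur hv, hvp.1, rest_⟩
      · rintro ⟨v, hv, hvp, rest_⟩
        rcases List.mem_cons.mp hv with rfl | hv
        · exact absurd hcp hvp
        · refine ⟨v, hv, ?_, rest_⟩
          simp only [List.mem_append, List.mem_singleton, not_or]
          exact ⟨hvp, fun h => hvp (h ▸ hcp)⟩
    · have hcp : cur ∉ pref := fun h => hc ((hseen cur).mpr h)
      subst hU
      by_cases hany : ((preds.getD cur []).any
          (fun e => e != cur && !(PySem.Set.contains seen e) && PySem.Set.contains (PySem.Set.ofList (pref ++ cur :: rest)) e)) = true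
      · have e1 : pvScanB preds (PySem.Set.ofList (pref ++ cur :: rest)) seen (cur :: rest) = false := by
          simp only [pvScanB]; rw [if_neg hc, if_pos hany]
        rw [e1]
        simp only [true_iff]
        rcases List.any_eq_true.mp hany with ⟨e, he, htest⟩
        rcases (pvInnerTest_iff pref rest cur e seen hseen hcp).mp htest with ⟨hu, hlt⟩
        exact ⟨cur, List.mem_cons_self, hcp, e, he, hu, hlt⟩
      · have e1 : pvScanB preds (PySem.Set.ofList (pref ++ cur :: rest)) seen (cur :: rest)
            = pvScanB preds (PySem.Set.ofList (pref ++ cur :: rest)) (PySem.Set.add seen cur) rest := by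
          simp only [pvScanB]; rw [if_neg hc, if_neg hany]
        rw [e1]
        have hseen' : ∀ x : Int, PySem.Set.contains (PySem.Set.add seen cur) x = true
            ↔ x ∈ pref ++ [cur] := fun x => by
          rw [PySem.Set.contains_iff, PySem.Set.mem_add seen cur x,
            ← PySem.Set.contains_iff seen x, hseen x]
          simp only [List.mem_append, List.mem_singleton]
        rw [ih (pref ++ [cur]) (PySem.Set.add seen cur) (by simp) hseen']
        have hnoCur : ¬ ∃ e ∈ preds.getD cur [], e ∈ pref ++ cur :: rest
            ∧ pvFi (pref ++ cur :: rest) cur < pvFi (pref ++ cur :: rest) e := by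
          rintro ⟨e, he, hu, hlt⟩
          exact hany (List.any_eq_true.mpr
            ⟨e, he, (pvInnerTest_iff pref rest cur e seen hseen hcp).mpr ⟨hu, hlt⟩⟩)
        constructor
        · rintro ⟨v, hv, hvp, rest_⟩
          simp only [List.mem_append, List.mem_singleton, not_or] at hvp
          exact ⟨v, List.mem_cons_of_mem cur hv, hvp.1, rest_⟩
        · rintro ⟨v, hv, hvp, rest_⟩
          rcases List.mem_cons.mp hv with rfl | hv
          · exact absurd rest_ hnoCur
          · refine ⟨v, hv, ?_, rest_⟩
            simp only [List.mem_append, List.mem_singleton, not_or]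
            refine ⟨hvp, ?_⟩
            rintro rfl
            exact absurd rest_ hnoCur

theorem checkB_eq_viol (rules : List (Int × List Int)) (update : List Int) :
    check_valid_update_alt rules update = !pvViolB rules update := by
  have hfalse : check_valid_update_alt rules update = false ↔ pvViolB rules update = true := by
    unfold check_valid_update_alt
    rw [pvScanB_false_iff (pvBuildPreds rules) update update [] PySem.Set.empty rfl
      (fun x => by simp [PySem.Set.contains_iff, PySem.Set.empty])]
    unfold pvViolB
    simp only [List.any_eq_true, Bool.and_eq_true, decide_eq_true_eq, List.not_mem_nil,
      not_false_eq_true, true_and, pvBuildPreds_mem]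
    constructor
    · rintro ⟨v, hvU, e, ⟨l, hrl, hvl⟩, heU, hlt⟩
      exact ⟨(e, l), hrl, heU, v, hvl, hvU, hlt⟩
    · rintro ⟨p, hp, heU, v, hvl, hvU, hlt⟩
      exact ⟨v, hvU, p.1, ⟨p.2, by simpa using hp, hvl⟩, heU, hlt⟩
  cases hB : check_valid_update_alt rules update <;>
    cases hV : pvViolB rules update <;> simp_all

-- ===== VERDICT (by name: the statement is the Claim_ definition above) =====
theorem check_valid_update_spec : Claim_equal_check_valid_update := by
  intro rules update _
  unfold Spec_check_valid_update
  rw [checkA_eq_viol, checkB_eq_viol]
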